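-- pv_equiv track=rewrite | github.com/nyimbi/semantica | semantica/ontology/ontology_validator.py | _check_circular_hierarchy
-- ===== SOURCE A (Python) =====
-- from typing import Any, Dict, List, Optional
--
-- def _check_circular_hierarchy(classes: List[Dict[str, Any]]) -> List[str]:
--     """Check for circular inheritance."""
--     errors = []
--     parent_map = {}
--
--     for cls in classes:
--         if "subClassOf" in cls or "parent" in cls:
--             parent = cls.get("subClassOf") or cls.get("parent")
--             if parent:
--                 parent_map[cls["name"]] = parent
--
--     # Check for cycles
--     visited = set()
--     rec_stack = set()
--
--     def has_cycle(node: str) -> bool: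
--         visited.add(node)
--         rec_stack.add(node)
--
--         if node in parent_map:
--             parent = parent_map[node]
--             if parent in rec_stack:
--                 return True
--             if parent not in visited and has_cycle(parent):
--                 return True
--
--         rec_stack.remove(node)
--         return False
--
--     for cls in classes:
--         if cls["name"] not in visited:
--             if has_cycle(cls["name"]):
--                 errors.append(f"Circular hierarchy detected involving class: {cls['name']}")
--
--     return errors
-- ===== SOURCE B (Python) =====
-- def _check_circular_hierarchy(classes):
--     """Check for circular inheritance via a memoised per-node cycle-status table."""
--     errors = []
--     parent_map = {}
--     for cls in classes:
--         p = cls.get("subClassOf") or cls.get("parent")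
--         if p:
--             parent_map[cls["name"]] = p
--
--     cyclic = {}  # node -> does its ancestor chain run into a cycle?
--     for cls in classes:
--         name = cls["name"]
--         if name in cyclic:
--             continue
--         trail = []
--         cur = name
--         while cur in parent_map and cur not in cyclic and cur not in trail:
--             trail.append(cur)
--             cur = parent_map[cur]
--         verdict = cur in trail or cyclic.get(cur, False)
--         for n in trail:
--             cyclic[n] = verdict
--         if verdict:
--             errors.append(f"Circular hierarchy detected involving class: {name}")
--     return errors
-- ===== Notes on version B (the rewrite author's own statement) =====
-- stated objective: alternative
-- what changed: Replaces A's recursive DFS with a shared visited set and a mutable rec_stack (nested function, cross-call removal discipline) by a memoised per-node cycle-status dict filled by an iterative trail walk per start class; the parent_map build also drops A's redundant key-presence guard.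
import Mathlib
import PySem

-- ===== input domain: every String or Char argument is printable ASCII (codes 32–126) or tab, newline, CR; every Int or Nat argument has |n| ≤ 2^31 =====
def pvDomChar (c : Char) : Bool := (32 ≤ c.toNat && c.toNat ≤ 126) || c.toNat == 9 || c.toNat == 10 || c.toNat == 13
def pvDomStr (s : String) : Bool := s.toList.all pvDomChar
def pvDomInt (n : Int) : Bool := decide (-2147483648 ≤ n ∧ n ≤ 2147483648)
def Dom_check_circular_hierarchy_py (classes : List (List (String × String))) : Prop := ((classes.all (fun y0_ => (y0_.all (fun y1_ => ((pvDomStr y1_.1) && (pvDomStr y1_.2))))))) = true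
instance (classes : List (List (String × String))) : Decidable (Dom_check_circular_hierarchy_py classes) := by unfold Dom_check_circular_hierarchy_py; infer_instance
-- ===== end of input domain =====

-- B replaces A's recursive DFS (shared visited set + leaky rec_stack) by a memoised per-node
-- cycle-status dict filled by an iterative trail walk; objective: alternative decomposition, same cost.

-- ===== PORT A =====
-- dict-literal helpers for a class record (first-match lookup, per the assoc-list dict convention)
def pvGetKey? (cls : List (String × String)) (k : String) : Option String :=
  (cls.find? (fun kv => kv.1 == k)).map (·.2)
def pvHasKey (cls : List (String × String)) (k : String) : Bool :=
  cls.any (fun kv => kv.1 == k)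

-- A's parent_map loop, including the redundant `if "subClassOf" in cls or "parent" in cls` guard
def pvParentMap (classes : List (List (String × String))) : PySem.Dict String String :=
  classes.foldl (fun pm cls =>
    if pvHasKey cls "subClassOf" || pvHasKey cls "parent" then
      -- `parent = cls.get("subClassOf") or cls.get("parent")`, then `if parent:`
      match (match pvGetKey? cls "subClassOf" with
             | some s => if s == "" then pvGetKey? cls "parent" else some s
             | none => pvGetKey? cls "parent") with
      | some p => if p == "" then pm else pm.insert ((pvGetKey? cls "name").getD "") p
      | none => pm
    else pm) PySem.Dict.empty

-- `has_cycle`: fuel makes the recursion structural; with the fuel used below (pm.size + 1,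
-- an upper bound on the recursion depth, since each recursive step visits a fresh pm key)
-- the 0-fuel branch is never reached, so this is A's recursion step for step.
def pvHasCycle (pm : PySem.Dict String String) :
    Nat → String → PySem.Set String → PySem.Set String → Bool × PySem.Set String × PySem.Set String
  | 0, _, visited, rs => (false, visited, rs)
  | fuel+1, node, visited, rs =>
    let visited := PySem.Set.add visited node
    let rs := PySem.Set.add rs node
    match pm.get? node with
    | some parent =>
      if PySem.Set.contains rs parent then (true, visited, rs)
      else if !(PySem.Set.contains visited parent) then
        match pvHasCycle pm fuel parent visited rs with
        | (true, v2, r2) => (true, v2, r2)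
        | (false, v2, r2) => (false, v2, PySem.Set.discard r2 node)  -- rec_stack.remove(node)
      else (false, visited, PySem.Set.discard rs node)
    | none => (false, visited, PySem.Set.discard rs node)

def pvStepA (pm : PySem.Dict String String)
    (st : List String × PySem.Set String × PySem.Set String) (cls : List (String × String)) :
    List String × PySem.Set String × PySem.Set String :=
  let name := (pvGetKey? cls "name").getD ""
  if PySem.Set.contains st.2.1 name then st
  else
    match pvHasCycle pm (pm.size + 1) name st.2.1 st.2.2 with
    | (true, v2, r2) => (st.1 ++ ["Circular hierarchy detected involving class: " ++ name], v2, r2)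
    | (false, v2, r2) => (st.1, v2, r2)

def check_circular_hierarchy_py (classes : List (List (String × String))) : List String :=
  let pm := pvParentMap classes
  (classes.foldl (pvStepA pm) ([], [], [])).1

-- ===== PORT B =====
-- Source B's own record lookup (recursive first-match)
def pvLookup? : List (String × String) → String → Option String
  | [], _ => none
  | kv :: rest, key => if kv.1 == key then some kv.2 else pvLookup? rest key

-- truthiness of an optional string: some "" and none are both falsy
def pvStr? (o : Option String) : Option String :=
  o.bind (fun s => if s == "" then none else some s)

-- Source B's builder: `p = cls.get("subClassOf") or cls.get("parent"); if p: parent_map[cls["name"]] = p`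
def pvParentMapB (classes : List (List (String × String))) : PySem.Dict String String :=
  classes.foldl (fun pm cls =>
    match (pvStr? (pvLookup? cls "subClassOf")).orElse
          (fun _ => pvStr? (pvLookup? cls "parent")) with
    | some p => pm.insert ((pvLookup? cls "name").getD "") p
    | none => pm) PySem.Dict.empty

-- the `while cur in parent_map and cur not in cyclic and cur not in trail` walk;
-- fuel pm.size + 1 bounds the iteration count (each pass appends a fresh pm key to trail)
def pvTrailB (pm : PySem.Dict String String) (cyc : PySem.Dict String Bool) :
    Nat → String → List String → List String × String
  | 0, cur, trail => (trail, cur)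
  | fuel+1, cur, trail =>
    match pm.get? cur with
    | none => (trail, cur)
    | some p =>
      if (cyc.get? cur).isSome || trail.contains cur then (trail, cur)
      else pvTrailB pm cyc fuel p (trail ++ [cur])

def pvStepB (pm : PySem.Dict String String)
    (st : List String × PySem.Dict String Bool) (cls : List (String × String)) :
    List String × PySem.Dict String Bool :=
  let name := (pvLookup? cls "name").getD ""
  if (st.2.get? name).isSome then st
  else
    match pvTrailB pm st.2 (pm.size + 1) name [] with
    | (trail, cur) =>
      let verdict := trail.contains cur || ((st.2.get? cur).getD false)
      let cyc := trail.foldl (fun d n => d.insert n verdict) st.2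
      (if verdict then st.1 ++ ["Circular hierarchy detected involving class: " ++ name] else st.1,
       cyc)

def check_circular_hierarchy_py_alt (classes : List (List (String × String))) : List String :=
  let pm := pvParentMapB classes
  (classes.foldl (pvStepB pm) ([], PySem.Dict.empty)).1

-- ===== PRECONDITION & SPEC =====
-- A evaluates cls["name"] for every class (KeyError when missing); Pre_ excludes exactly those inputs.
def Pre_check_circular_hierarchy_py (classes : List (List (String × String))) : Prop :=
  ∀ cls ∈ classes, (cls.any (fun kv => kv.1 == "name")) = true
instance (classes : List (List (String × String))) : Decidable (Pre_check_circular_hierarchy_py classes) := by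
  unfold Pre_check_circular_hierarchy_py; infer_instance

def pvWitness_check_circular_hierarchy_py : (List (List (String × String))) :=
  [[("name", "A"), ("subClassOf", "B")], [("name", "B"), ("subClassOf", "A")], [("name", "C"), ("parent", "A")]]

def Spec_check_circular_hierarchy_py (classes : List (List (String × String))) (out : List String) : Prop := out = check_circular_hierarchy_py_alt classes
instance (classes : List (List (String × String))) (out : List String) : Decidable (Spec_check_circular_hierarchy_py classes out) := by unfold Spec_check_circular_hierarchy_py; infer_instance

-- ===== CLAIM (what is proved, stated in full; the proofs are below) =====
def Claim_equal_check_circular_hierarchy_py : Prop := ∀ (classes : List (List (String × String))), Dom_check_circular_hierarchy_py classes → Pre_check_circular_hierarchy_py classes → Spec_check_circular_hierarchy_py classes (check_circular_hierarchy_py classes)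

-- ===== LEMMAS AND PROOFS =====

-- the two record lookups agree
lemma pvLookup_eq (cls : List (String × String)) (k : String) :
    pvLookup? cls k = pvGetKey? cls k := by
  induction cls with
  | nil => rfl
  | cons kv rest ih =>
    by_cases h : kv.1 == k
    · simp [pvLookup?, pvGetKey?, h]
    · simpa [pvLookup?, pvGetKey?, h] using ih

-- key presence = lookup success
lemma pvHasKey_eq_isSome (cls : List (String × String)) (k : String) :
    pvHasKey cls k = (pvGetKey? cls k).isSome := by
  induction cls with
  | nil => rfl
  | cons kv rest ih =>
    by_cases h : kv.1 == k
    · simp [pvHasKey, pvGetKey?, h]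
    · simpa [pvHasKey, pvGetKey?, h] using ih

-- the two parent_map builders produce the same dict
lemma pvParentMapB_eq (classes : List (List (String × String))) :
    pvParentMapB classes = pvParentMap classes := by
  unfold pvParentMapB pvParentMap
  congr 1
  funext pm cls
  simp only [pvLookup_eq]
  rcases h1 : pvGetKey? cls "subClassOf" with _ | s1
  · rcases h2 : pvGetKey? cls "parent" with _ | s2
    · simp [pvHasKey_eq_isSome, h1, h2, pvStr?, Option.orElse]
    · by_cases hs : s2 = "" <;>
        simp [pvHasKey_eq_isSome, h1, h2, pvStr?, hs, Option.orElse]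
  · by_cases hs1 : s1 = ""
    · rcases h2 : pvGetKey? cls "parent" with _ | s2
      · simp [pvHasKey_eq_isSome, h1, h2, pvStr?, hs1, Option.orElse]
      · by_cases hs2 : s2 = "" <;>
          simp [pvHasKey_eq_isSome, h1, h2, pvStr?, hs1, hs2, Option.orElse]
    · simp [pvHasKey_eq_isSome, h1, pvStr?, hs1, Option.orElse]

-- the walk stops immediately on a parentless, already-classified or already-on-trail node
lemma pvTrailB_stop (pm : PySem.Dict String String) (cyc : PySem.Dict String Bool)
    (fuel : Nat) (p : String) (trail : List String)
    (h : pm.get? p = none ∨ (cyc.get? p).isSome = true ∨ p ∈ trail) :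
    pvTrailB pm cyc fuel p trail = (trail, p) := by
  cases fuel with
  | zero => rfl
  | succ f =>
    rcases h with h | h | h
    · simp [pvTrailB, h]
    · cases hg : pm.get? p
      · simp [pvTrailB, hg]
      · simp [pvTrailB, hg, h]
    · cases hg : pm.get? p
      · simp [pvTrailB, hg]
      · simp only [pvTrailB, hg, List.contains_iff_mem.2 h, Bool.or_true, if_true]

-- removing the just-appended element of a duplicate-free set restores it
lemma pv_discard_append_singleton (s : PySem.Set String) (x : String) (hx : x ∉ s) :
    PySem.Set.discard (s ++ [x]) x = s := by
  have h2 : List.filter (fun y => !(y == x)) s = s :=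
    List.filter_eq_self.2 (fun y hy => by simpa using fun h : y = x => hx (h ▸ hy))
  simp [PySem.Set.discard, List.filter_append, h2]

-- lookup after the `for n in trail: cyclic[n] = verdict` loop
lemma pv_get_foldl_insert (cyc : PySem.Dict String Bool) (b : Bool) (trail : List String) (n : String) :
    (trail.foldl (fun d t => d.insert t b) cyc).get? n
      = if n ∈ trail then some b else cyc.get? n := by
  induction trail generalizing cyc with
  | nil => simp
  | cons t ts ih =>
    simp only [List.foldl_cons, ih, List.mem_cons]
    by_cases hn : n ∈ ts
    · simp [hn]
    · by_cases ht : n = t <;> simp [hn, ht, PySem.Dict.get?_insert_self, PySem.Dict.get?_insert_of_ne]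

-- simulation: A's has_cycle from `node` mirrors B's trail walk, step for step.
-- A's visited = v, rec_stack = rs0 ++ trail; cyc is B's status table, fixed during one walk.
-- Δ = the new trail nodes, ε = the new visited nodes (Δ plus possibly a parentless terminal).
lemma pv_sim (pm : PySem.Dict String String) (cyc : PySem.Dict String Bool) :
    ∀ (fuel : Nat) (node : String) (v trail rs0 : PySem.Set String),
    (∀ n, (cyc.get? n).isSome = true → n ∈ v) →
    (∀ n, (cyc.get? n = some true ↔ n ∈ rs0)) →
    (∀ n, n ∈ v → n ∉ trail → cyc.get? n = none → pm.get? n = none) →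
    node ∉ v → node ∉ trail →
    (∀ t ∈ trail, t ∈ v) →
    ∃ Δ ε cur b,
      pvTrailB pm cyc fuel node trail = (trail ++ Δ, cur) ∧
      b = ((trail ++ Δ).contains cur || ((cyc.get? cur).getD false)) ∧
      pvHasCycle pm fuel node v (rs0 ++ trail) =
        (b, v ++ ε, if b then rs0 ++ (trail ++ Δ) else rs0 ++ trail) ∧
      (∀ t ∈ Δ, t ∈ ε ∧ t ∉ v ∧ cyc.get? t = none) ∧
      (∀ x ∈ ε, x ∈ Δ ∨ pm.get? x = none) := by
  intro fuel
  induction fuel with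
  | zero =>
    intro node v trail rs0 I1 I2 I3 hnv hnt htr
    have hc : cyc.get? node = none := by
      rcases h : cyc.get? node with _ | bv
      · rfl
      · exact absurd (I1 node (by simp [h])) hnv
    have hct : trail.contains node = false := by
      rcases h : trail.contains node
      · rfl
      · exact absurd (List.contains_iff_mem.1 h) hnt
    exact ⟨[], [], node, false, by simp [pvTrailB], by simp [hc, hnt],
      by simp [pvHasCycle], by simp, by simp⟩
  | succ f ih =>
    intro node v trail rs0 I1 I2 I3 hnv hnt htr
    have hc : cyc.get? node = none := by
      rcases h : cyc.get? node with _ | bv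
      · rfl
      · exact absurd (I1 node (by simp [h])) hnv
    have hct : trail.contains node = false := by
      rcases h : trail.contains node
      · rfl
      · exact absurd (List.contains_iff_mem.1 h) hnt
    have hnrs : node ∉ rs0 := fun h => hnv (I1 node (by simp [(I2 node).2 h]))
    have hnoderst : node ∉ rs0 ++ trail := by
      intro h; rcases List.mem_append.1 h with h | h
      · exact hnrs h
      · exact hnt h
    have hvadd : PySem.Set.add v node = v ++ [node] := PySem.Set.add_of_not_mem hnv
    have hrsadd : PySem.Set.add (rs0 ++ trail) node = (rs0 ++ trail) ++ [node] :=
      PySem.Set.add_of_not_mem hnoderst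
    have hdisc : PySem.Set.discard (rs0 ++ (trail ++ [node])) node = rs0 ++ trail := by
      rw [← List.append_assoc]; exact pv_discard_append_singleton _ _ hnoderst
    cases hget : pm.get? node with
    | none =>
      refine ⟨[], [node], node, false, by simp [pvTrailB, hget], by simp [hc, hnt], ?_,
        by simp, by simp [hget]⟩
      simp [pvHasCycle, hget, hvadd, hrsadd, hdisc]
    | some p =>
      have hBstep : pvTrailB pm cyc (f+1) node trail = pvTrailB pm cyc f p (trail ++ [node]) := by
        simp [pvTrailB, hget, hc, hnt]
      by_cases hp1 : p ∈ (rs0 ++ trail) ++ [node]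
      · -- parent in rec_stack: cycle
        have hstop : pvTrailB pm cyc f p (trail ++ [node]) = (trail ++ [node], p) := by
          rcases List.mem_append.1 hp1 with h | h
          · rcases List.mem_append.1 h with h | h
            · exact pvTrailB_stop _ _ _ _ _ (Or.inr (Or.inl (by simp [(I2 p).2 h])))
            · exact pvTrailB_stop _ _ _ _ _ (Or.inr (Or.inr (List.mem_append_left _ h)))
          · exact pvTrailB_stop _ _ _ _ _ (Or.inr (Or.inr (List.mem_append_right _ h)))
        have hb : ((trail ++ [node]).contains p || ((cyc.get? p).getD false)) = true := by
          rcases List.mem_append.1 hp1 with h | h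
          · rcases List.mem_append.1 h with h | h
            · simp [(I2 p).2 h]
            · simp [h]
          · simp [show p = node from by simpa using h]
        have hp1' : p ∈ rs0 ∨ p ∈ trail ∨ p = node := by simpa using hp1
        refine ⟨[node], [node], p, true, by rw [hBstep, hstop], hb.symm, ?_,
          by simp [hnv, hc], by simp⟩
        simp [pvHasCycle, hget, hvadd, hrsadd, hp1', List.append_assoc]
      · by_cases hp2 : p ∈ v ++ [node]
        · -- parent visited but not on any live stack: safe
          have hpn : p ≠ node := fun h => hp1 (by simp [h])
          have hpv : p ∈ v := by
            rcases List.mem_append.1 hp2 with h | h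
            · exact h
            · exact absurd (by simpa using h) hpn
          have hpt : p ∉ trail := fun h => hp1 (by simp [h])
          have hstop : pvTrailB pm cyc f p (trail ++ [node]) = (trail ++ [node], p) := by
            rcases hcp : cyc.get? p with _ | bv
            · exact pvTrailB_stop _ _ _ _ _ (Or.inl (I3 p hpv hpt hcp))
            · exact pvTrailB_stop _ _ _ _ _ (Or.inr (Or.inl (by simp [hcp])))
          have hb : ((trail ++ [node]).contains p || ((cyc.get? p).getD false)) = false := by
            rcases hcp : cyc.get? p with _ | bv
            · simp [hpt, hpn]
            · cases bv
              · simp [hpt, hpn]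
              · exact absurd ((I2 p).1 hcp) (fun h => hp1 (by simp [h]))
          have hnp1 : ¬(p ∈ rs0 ∨ p ∈ trail ∨ p = node) := by simpa using hp1
          have hp2' : p ∈ v ∨ p = node := by simpa using hp2
          refine ⟨[node], [node], p, false, by rw [hBstep, hstop], hb.symm, ?_,
            by simp [hnv, hc], by simp⟩
          simp [pvHasCycle, hget, hvadd, hrsadd, hnp1, hp2', hdisc]
        · -- fresh parent: both sides continue
          have hpt' : p ∉ trail ++ [node] := by
            intro h; rcases List.mem_append.1 h with h | h
            · exact hp1 (by simp [h])
            · exact hp1 (by simp [(by simpa using h : p = node)])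
          have I1' : ∀ n, (cyc.get? n).isSome = true → n ∈ v ++ [node] :=
            fun n h => List.mem_append_left _ (I1 n h)
          have I3' : ∀ n, n ∈ v ++ [node] → n ∉ trail ++ [node] → cyc.get? n = none →
              pm.get? n = none := by
            intro n hn hnt' hcn
            rcases List.mem_append.1 hn with h | h
            · exact I3 n h (fun ht => hnt' (List.mem_append_left _ ht)) hcn
            · have hn2 : n = node := by simpa using h
              subst hn2
              exact absurd (List.mem_append_right trail (by simp)) hnt'
          have htr' : ∀ t ∈ trail ++ [node], t ∈ v ++ [node] := by
            intro t ht; rcases List.mem_append.1 ht with h | h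
            · exact List.mem_append_left _ (htr t h)
            · exact List.mem_append_right _ h
          obtain ⟨Δ', ε', cur', b', hB', hbeq', hA', hΔ', hε'⟩ :=
            ih p (v ++ [node]) (trail ++ [node]) rs0 I1' I2 I3' hp2 hpt' htr'
          have hnp1 : ¬(p ∈ rs0 ∨ p ∈ trail ∨ p = node) := by simpa using hp1
          have hnp2 : ¬(p ∈ v ∨ p = node) := by simpa using hp2
          have hΔprops : ∀ t ∈ [node] ++ Δ', t ∈ [node] ++ ε' ∧ t ∉ v ∧ cyc.get? t = none := by
            intro t ht
            rcases List.mem_append.1 ht with h | h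
            · have : t = node := by simpa using h
              subst this; exact ⟨by simp, hnv, hc⟩
            · obtain ⟨h1, h2, h3⟩ := hΔ' t h
              exact ⟨List.mem_append_right _ h1, fun hv => h2 (List.mem_append_left _ hv), h3⟩
          have hεprops : ∀ x ∈ [node] ++ ε', x ∈ [node] ++ Δ' ∨ pm.get? x = none := by
            intro x hx
            rcases List.mem_append.1 hx with h | h
            · exact Or.inl (List.mem_append_left _ h)
            · rcases hε' x h with h2 | h2
              · exact Or.inl (List.mem_append_right _ h2)
              · exact Or.inr h2
          cases b' with
          | true =>
            refine ⟨[node] ++ Δ', [node] ++ ε', cur', true, ?_, ?_, ?_, hΔprops, hεprops⟩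
            · rw [hBstep, hB']; simp [List.append_assoc]
            · rw [show trail ++ ([node] ++ Δ') = (trail ++ [node]) ++ Δ' from
                (List.append_assoc _ _ _).symm]
              exact hbeq'
            · simp [pvHasCycle, hget, hvadd, hrsadd, hnp1, hnp2, hA', List.append_assoc]
          | false =>
            refine ⟨[node] ++ Δ', [node] ++ ε', cur', false, ?_, ?_, ?_, hΔprops, hεprops⟩
            · rw [hBstep, hB']; simp [List.append_assoc]
            · rw [show trail ++ ([node] ++ Δ') = (trail ++ [node]) ++ Δ' from
                (List.append_assoc _ _ _).symm]
              exact hbeq'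
            · simp [pvHasCycle, hget, hvadd, hrsadd, hnp1, hnp2, hA', List.append_assoc, hdisc]

-- one outer-loop step: A's (errors, visited, rec_stack) and B's (errors, cyclic) stay related
lemma pv_step (pm : PySem.Dict String String)
    (errors : List String) (v rs : PySem.Set String) (cyc : PySem.Dict String Bool)
    (I1 : ∀ n, (cyc.get? n).isSome = true → n ∈ v)
    (I2 : ∀ n, cyc.get? n = some true ↔ n ∈ rs)
    (I3 : ∀ n, n ∈ v → cyc.get? n = none → pm.get? n = none)
    (cls : List (String × String)) :
    ∃ errors' v' rs' cyc',
      pvStepA pm (errors, v, rs) cls = (errors', v', rs') ∧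
      pvStepB pm (errors, cyc) cls = (errors', cyc') ∧
      (∀ n, (cyc'.get? n).isSome = true → n ∈ v') ∧
      (∀ n, cyc'.get? n = some true ↔ n ∈ rs') ∧
      (∀ n, n ∈ v' → cyc'.get? n = none → pm.get? n = none) := by
  rcases hcg : cyc.get? ((pvGetKey? cls "name").getD "") with _ | bv
  · by_cases hv : (pvGetKey? cls "name").getD "" ∈ v
    · -- A skips; B walks, but the name is a parentless terminal: nothing changes
      have hpm : pm.get? ((pvGetKey? cls "name").getD "") = none := I3 _ hv hcg
      refine ⟨errors, v, rs, cyc, by simp [pvStepA, hv], ?_, I1, I2, I3⟩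
      simp [pvStepB, pvLookup_eq, hcg,
        pvTrailB_stop pm cyc (pm.size + 1) ((pvGetKey? cls "name").getD "") [] (Or.inl hpm)]
    · -- neither side skips: run the simulation
      obtain ⟨Δ, ε, cur, b, hB, hbeq, hA, hΔ, hε⟩ :=
        pv_sim pm cyc (pm.size + 1) ((pvGetKey? cls "name").getD "") v [] rs I1 I2
          (fun n hn _ => I3 n hn) hv (by simp) (by simp)
      simp only [List.nil_append, List.append_nil] at hB hbeq hA
      have hrs_sub : ∀ x ∈ rs, x ∈ v := fun x hx => I1 x (by simp [(I2 x).2 hx])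
      have hcv : PySem.Set.contains v ((pvGetKey? cls "name").getD "") = false := by
        rcases h : PySem.Set.contains v ((pvGetKey? cls "name").getD "")
        · rfl
        · exact absurd ((PySem.Set.contains_iff _ _).1 h) hv
      refine ⟨if b then errors ++
                ["Circular hierarchy detected involving class: " ++ (pvGetKey? cls "name").getD ""]
              else errors,
              v ++ ε, if b then rs ++ Δ else rs,
              Δ.foldl (fun d t => d.insert t b) cyc, ?_, ?_, ?_, ?_, ?_⟩
      · simp only [pvStepA, hcv, Bool.false_eq_true, if_false, hA]
        cases b <;> rfl
      · simp only [pvStepB, pvLookup_eq, hcg, Option.isSome_none, Bool.false_eq_true, if_false, hB]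
        simp only [show List.contains Δ cur = PySem.Set.contains Δ cur from rfl]
        rw [← hbeq]
      · intro n h
        rw [pv_get_foldl_insert] at h
        by_cases hnΔ : n ∈ Δ
        · exact List.mem_append_right _ (hΔ n hnΔ).1
        · rw [if_neg hnΔ] at h
          exact List.mem_append_left _ (I1 n h)
      · intro n
        rw [pv_get_foldl_insert]
        by_cases hnΔ : n ∈ Δ
        · have hnrs : n ∉ rs := fun h => (hΔ n hnΔ).2.1 (hrs_sub n h)
          cases b <;> simp [hnΔ, hnrs]
        · rw [if_neg hnΔ]
          cases b <;> simp [hnΔ, I2 n]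
      · intro n hn hcn
        rw [pv_get_foldl_insert] at hcn
        by_cases hnΔ : n ∈ Δ
        · rw [if_pos hnΔ] at hcn; cases hcn
        · rw [if_neg hnΔ] at hcn
          rcases List.mem_append.1 hn with h | h
          · exact I3 n h hcn
          · rcases hε n h with h2 | h2
            · exact absurd h2 hnΔ
            · exact h2
  · -- the name is already classified: both sides skip
    have hv : (pvGetKey? cls "name").getD "" ∈ v := I1 _ (by simp [hcg])
    exact ⟨errors, v, rs, cyc, by simp [pvStepA, hv],
      by simp [pvStepB, pvLookup_eq, hcg], I1, I2, I3⟩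

-- the outer loops keep equal error lists and related state
lemma pv_loop (pm : PySem.Dict String String) :
    ∀ (classes : List (List (String × String)))
      (errors : List String) (v rs : PySem.Set String) (cyc : PySem.Dict String Bool),
    (∀ n, (cyc.get? n).isSome = true → n ∈ v) →
    (∀ n, cyc.get? n = some true ↔ n ∈ rs) →
    (∀ n, n ∈ v → cyc.get? n = none → pm.get? n = none) →
    (classes.foldl (pvStepA pm) (errors, v, rs)).1 = (classes.foldl (pvStepB pm) (errors, cyc)).1 := by
  intro classes
  induction classes with
  | nil => intro errors v rs cyc _ _ _; rfl
  | cons cls rest ih =>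
    intro errors v rs cyc I1 I2 I3
    obtain ⟨errors', v', rs', cyc', hA, hB, J1, J2, J3⟩ := pv_step pm errors v rs cyc I1 I2 I3 cls
    simp only [List.foldl_cons, hA, hB]
    exact ih errors' v' rs' cyc' J1 J2 J3

-- ===== VERDICT (by name: the statement is the Claim_ definition above) =====
theorem check_circular_hierarchy_py_spec : Claim_equal_check_circular_hierarchy_py := by
  intro classes _ _
  show check_circular_hierarchy_py classes = check_circular_hierarchy_py_alt classes
  simp only [check_circular_hierarchy_py, check_circular_hierarchy_py_alt, pvParentMapB_eq]
  exact pv_loop (pvParentMap classes) classes [] [] [] PySem.Dict.empty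
    (by simp) (by simp) (by intro n h h2; cases h)
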